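/- GENERATED by farm/mkstatement.py from design/units.tsv (unit `start_decoder.C3c`) and the assertions of Vorbis/Spec/StartDecoderC3.lean — do not edit.
   THE STATEMENT of the proof unit `start_decoder.C3c`: segment C3c of `start_decoder` (1 instructions; entries 0x114590;
   exits 0x114594; ranges 0x114590-0x114590)
   takes each of its entry assertions to one of its exit assertions (`Vorbis.Spec.StartDecoder.SegC3c`), given the contracts of its callees.
   What the names mean: Vorbis/Spec/Basic.lean (the shared hypotheses), Vorbis/Spec/StartDecoderC3.lean (the assertions). The theorem to prove:
   `theorem start_decoder_C3c_ok : Vorbis.Spec.start_decoder_C3c.Statement`. -/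
import Vorbis.Spec.StartDecoderC3
namespace Vorbis.Spec.start_decoder_C3c
open X86 X86.User Asan

/-- The statement of unit `start_decoder.C3c`. -/
def Statement : Prop :=
  ∀ (Lay : Layout) (_hLay : Lay.hi = 0x1000000) (μ : Microarch) (_hμ : UserX.MicroOK μ) (u₀ : State)
    (_hcode : HasCodeNat Lay u₀ Vorbis.L.start_decoder.entry Vorbis.Code.code_start_decoder.nat Vorbis.L.start_decoder.size),
    Vorbis.Spec.StartDecoder.SegC3c Lay μ u₀

end Vorbis.Spec.start_decoder_C3c
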